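-- pv_equiv track=rewrite | github.com/karenfbc/Proyecto1Dalgo | Prueba_2.py | min_movimientos
-- ===== SOURCE A (Python) =====
-- def min_movimientos(torres):
--     # Base case: si solo hay una torre, el mínimo número de movimientos es 0
--     if len(torres) == 1:
--         return 0
--
--     # Creamos una matriz para memoización
--     n = len(torres)
--     memo = [[-1] * n for _ in range(n)]
--
--     # Función auxiliar recursiva
--     def helper(torres, index, prev_index):
--         # Verificar si ya hemos calculado este estado
--         if memo[index][prev_index] != -1:
--             return memo[index][prev_index]
--
--         # Base case: si hemos llegado al final de las torres, el mínimo número de movimientos es 0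
--         if index == len(torres) - 1:
--             return 0
--
--         min_movs = 10000000000000000
--         for i in range(max(0, prev_index-1), min(n, prev_index+2)):
--             if torres[i] < torres[index]:
--                 # Calcular los movimientos restantes recursivamente
--                 movimientos_restantes = helper(torres, i, index)
--                 # Actualizar el mínimo número de movimientos
--                 min_movs = min(min_movs, movimientos_restantes)
--
--         # Guardar el resultado en la matriz de memoización
--         memo[index][prev_index] = min_movs + 1
--         return min_movs + 1
--
--     # Llamar a la función auxiliar con las torres y el índice inicial
--     return helper(torres, 0, 0)
-- ===== SOURCE B (Python) =====
-- def min_movimientos(torres):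
--     n = len(torres)
--     BIG = 10000000000000000
--     # bottom-up DP over a full table val[index][prev]; process indices in
--     # nondecreasing order of torres[index] so every child state val[i][index]
--     # (which needs torres[i] < torres[index]) is already final.
--     val = [[0] * n for _ in range(n)]
--     order = sorted(range(n), key=lambda i: torres[i])
--     for index in order:
--         if index == n - 1:
--             continue  # reaching the last tower costs 0 from any prev
--         for prev in range(n):
--             best = BIG
--             for i in range(max(0, prev - 1), min(n, prev + 2)):
--                 if torres[i] < torres[index]:
--                     best = min(best, val[i][index])
--             val[index][prev] = best + 1
--     if n == 1:
--         return 0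
--     return val[0][0]
-- ===== Notes on version B (the rewrite author's own statement) =====
-- stated objective: alternative
-- what changed: Replaces A's memoized top-down recursion (helper with an n-by-n memo matrix) by an explicit bottom-up dynamic program: a table val[index][prev] filled by processing indices in nondecreasing order of torres[index], so every child state val[i][index] (needing torres[i] < torres[index]) is already final when read; B always fills the whole table, so it is slower than A on large inputs where A visits few states.
-- outside the precondition, e.g. on min_movimientos([]): A raises IndexError, B raises IndexError
import Mathlib
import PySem

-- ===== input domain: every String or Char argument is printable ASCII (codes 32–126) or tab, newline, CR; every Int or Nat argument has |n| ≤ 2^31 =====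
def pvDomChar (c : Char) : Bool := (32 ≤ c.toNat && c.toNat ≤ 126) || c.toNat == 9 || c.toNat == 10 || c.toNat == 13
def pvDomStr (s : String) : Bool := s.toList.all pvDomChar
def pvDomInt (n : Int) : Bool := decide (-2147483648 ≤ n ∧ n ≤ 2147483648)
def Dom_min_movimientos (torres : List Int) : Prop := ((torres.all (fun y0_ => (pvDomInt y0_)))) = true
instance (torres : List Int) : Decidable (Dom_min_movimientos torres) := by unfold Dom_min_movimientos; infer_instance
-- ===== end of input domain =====

-- B replaces A's memoized top-down recursion by an explicit bottom-up DP table filled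
-- in nondecreasing order of tower height (objective: alternative decomposition; B always
-- fills the whole n-by-n table, so it is slower than A on large inputs where A's memoized
-- recursion visits few states). Both programs raise IndexError on the empty list, so Pre_
-- requires torres ≠ [].

-- termination measure for the recursions on both sides: number of elements strictly
-- below the value at the current index  (cited by name in decreasing_by)
def pvMeasure (t : List Int) (index : Int) : Nat :=
  t.countP (fun x => decide (x < PySem.List.pyGetD t index 0))

theorem pv_countP_lt {t : List Int} {a b : Int} (ha : a ∈ t) (hab : a < b) :
    t.countP (fun x => decide (x < a)) < t.countP (fun x => decide (x < b)) := by
  induction t with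
  | nil => cases ha
  | cons y ys ih =>
    have hm : ys.countP (fun x => decide (x < a)) ≤ ys.countP (fun x => decide (x < b)) := by
      apply List.countP_mono_left
      intro z _ hz
      simp only [decide_eq_true_eq] at hz ⊢
      omega
    simp only [List.countP_cons, decide_eq_true_eq]
    rcases List.mem_cons.mp ha with h | h
    · subst h
      have h1 : ¬ (a < a) := lt_irrefl a
      simp only [h1, hab, if_true, if_false]
      omega
    · have hlt := ih h
      by_cases hy : y < a
      · have hyb : y < b := lt_trans hy hab
        simp only [hy, hyb, if_true]
        omega
      · by_cases hyb : y < b <;>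
          simp only [hy, hyb, if_true, if_false] <;> omega

theorem pv_measure_lt {t : List Int} {i index a b : Int}
    (hi : PySem.List.pyGet? t i = some a) (hidx : PySem.List.pyGet? t index = some b)
    (hab : a < b) : pvMeasure t i < pvMeasure t index := by
  have hma : a ∈ t := PySem.List.mem_of_pyGet?_eq_some t hi
  have hda : PySem.List.pyGetD t i 0 = a := by
    simp [PySem.List.pyGetD, hi]
  have hdb : PySem.List.pyGetD t index 0 = b := by
    simp [PySem.List.pyGetD, hidx]
  unfold pvMeasure
  rw [hda, hdb]
  exact pv_countP_lt hma hab

-- ===== PORT A =====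
-- A's n×n matrix 'memo' initialised with -1 is represented as a Dict keyed by
-- (index, prev) with default -1 (exact: every cell Python touches is in range
-- for nonempty torres; -1 means "not yet computed" in both representations).
mutual
  def pvHelperA (t : List Int) (index prev : Int)
      (memo : PySem.Dict (Int × Int) Int) : Int × PySem.Dict (Int × Int) Int :=
    let cached := memo.getD (index, prev) (-1)
    if cached ≠ -1 then (cached, memo)
    else if index = (t.length : Int) - 1 then (0, memo)
    else
      let r := pvLoopA t index
        (PySem.List.pyRange (max 0 (prev - 1)) (min (t.length : Int) (prev + 2)) 1)
        10000000000000000 memo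
      (r.1 + 1, r.2.insert (index, prev) (r.1 + 1))
  termination_by (pvMeasure t index, 1, 0)
  decreasing_by exact Prod.Lex.right _ (Prod.Lex.left _ _ (by omega))

  -- the 'for i in range(...)' loop of helper, threading (min_movs, memo);
  -- torres[i] / torres[index] via pyGet? (the none branches are Python's IndexError,
  -- unreachable for the in-range indices this loop receives)
  def pvLoopA (t : List Int) (index : Int) (is : List Int) (acc : Int)
      (memo : PySem.Dict (Int × Int) Int) : Int × PySem.Dict (Int × Int) Int :=
    match is with
    | [] => (acc, memo)
    | i :: rest =>
      match hi : PySem.List.pyGet? t i, hidx : PySem.List.pyGet? t index with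
      | some a, some b =>
        if h : a < b then
          let r := pvHelperA t i index memo
          pvLoopA t index rest (min acc r.1) r.2
        else pvLoopA t index rest acc memo
      | _, _ => pvLoopA t index rest acc memo
  termination_by (pvMeasure t index, 0, is.length)
  decreasing_by
    · exact Prod.Lex.left _ _ (pv_measure_lt hi hidx h)
    · exact Prod.Lex.right _ (Prod.Lex.right _ (by simp))
    · exact Prod.Lex.right _ (Prod.Lex.right _ (by simp))
    · exact Prod.Lex.right _ (Prod.Lex.right _ (by simp))
end

def min_movimientos (torres : List Int) : Int :=
  if torres.length = 1 then 0
  else (pvHelperA torres 0 0 PySem.Dict.empty).1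

-- ===== PORT B =====
-- B's n×n table 'val' initialised with 0 is represented as a Dict keyed by
-- (index, prev) with default 0 (exact: every cell Source B touches is in range
-- for nonempty torres; unwritten cells read as 0 in both representations).
def pvInnerB (t : List Int) (index prev : Int) (val : PySem.Dict (Int × Int) Int) : Int :=
  (PySem.List.pyRange (max 0 (prev - 1)) (min (t.length : Int) (prev + 2)) 1).foldl
    (fun best i =>
      if PySem.List.pyGetD t i 0 < PySem.List.pyGetD t index 0 then
        min best (val.getD (i, index) 0)
      else best)
    10000000000000000

def pvRowB (t : List Int) (index : Int) (val : PySem.Dict (Int × Int) Int) :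
    PySem.Dict (Int × Int) Int :=
  (PySem.List.pyRange 0 (t.length : Int) 1).foldl
    (fun val prev => val.insert (index, prev) (pvInnerB t index prev val + 1)) val

def min_movimientos_alt (torres : List Int) : Int :=
  let n : Int := torres.length
  let order := PySem.List.sorted (PySem.List.pyRange 0 n 1)
    (fun i => PySem.List.pyGetD torres i 0) false
  let val := order.foldl
    (fun val index => if index = n - 1 then val else pvRowB torres index val)
    PySem.Dict.empty
  if torres.length = 1 then 0 else val.getD (0, 0) 0

-- ===== PRECONDITION & SPEC =====
-- Pre_ excludes only the empty list, on which both A and B raise IndexError.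
def Pre_min_movimientos (torres : List Int) : Prop := torres ≠ []
instance (torres : List Int) : Decidable (Pre_min_movimientos torres) := by
  unfold Pre_min_movimientos; infer_instance
def pvWitness_min_movimientos : List Int := [3, 1, 2]

def Spec_min_movimientos (torres : List Int) (out : Int) : Prop := out = min_movimientos_alt torres
instance (torres : List Int) (out : Int) : Decidable (Spec_min_movimientos torres out) := by unfold Spec_min_movimientos; infer_instance

-- ===== CLAIM (what is proved, stated in full; the proofs are below) =====
def Claim_equal_min_movimientos : Prop := ∀ (torres : List Int), Dom_min_movimientos torres → Pre_min_movimientos torres → Spec_min_movimientos torres (min_movimientos torres)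

-- ===== LEMMAS AND PROOFS =====

-- the memo-free value of A's helper: the same recursion with the memo removed
mutual
  def pvH (t : List Int) (index prev : Int) : Int :=
    if index = (t.length : Int) - 1 then 0
    else
      pvHL t index
        (PySem.List.pyRange (max 0 (prev - 1)) (min (t.length : Int) (prev + 2)) 1)
        10000000000000000 + 1
  termination_by (pvMeasure t index, 1, 0)
  decreasing_by exact Prod.Lex.right _ (Prod.Lex.left _ _ (by omega))

  def pvHL (t : List Int) (index : Int) (is : List Int) (acc : Int) : Int :=
    match is with
    | [] => acc
    | i :: rest =>
      match hi : PySem.List.pyGet? t i, hidx : PySem.List.pyGet? t index with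
      | some a, some b =>
        if h : a < b then pvHL t index rest (min acc (pvH t i index))
        else pvHL t index rest acc
      | _, _ => pvHL t index rest acc
  termination_by (pvMeasure t index, 0, is.length)
  decreasing_by
    · exact Prod.Lex.left _ _ (pv_measure_lt hi hidx h)
    · exact Prod.Lex.right _ (Prod.Lex.right _ (by simp))
    · exact Prod.Lex.right _ (Prod.Lex.right _ (by simp))
    · exact Prod.Lex.right _ (Prod.Lex.right _ (by simp))
end

-- a memo is sound when every stored (≠ -1-defaulted) entry is the memo-free value
def pvOk (t : List Int) (memo : PySem.Dict (Int × Int) Int) : Prop :=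
  ∀ i p : Int, memo.getD (i, p) (-1) ≠ -1 → memo.getD (i, p) (-1) = pvH t i p


-- an in-range index reads as 'some' of its pyGetD value
theorem pv_get_some (t : List Int) (i : Int) (h0 : 0 ≤ i) (h1 : i < (t.length : Int)) :
    PySem.List.pyGet? t i = some (PySem.List.pyGetD t i 0) := by
  rw [PySem.List.pyGet?_eq_some_getElem (h0 := h0) (h1 := h1),
      PySem.List.pyGetD_eq_getElem (h0 := h0) (h1 := h1)]

theorem pvHelperA_ok (k : Nat) : ∀ (t : List Int) (index prev : Int)
    (memo : PySem.Dict (Int × Int) Int), pvMeasure t index ≤ k → pvOk t memo →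
    (pvHelperA t index prev memo).1 = pvH t index prev ∧ pvOk t (pvHelperA t index prev memo).2 := by
  induction k using Nat.strong_induction_on with
  | _ k IH =>
    intro t index prev memo hk hok
    have hloop : ∀ (is : List Int) (acc : Int) (memo : PySem.Dict (Int × Int) Int),
        pvOk t memo →
        (pvLoopA t index is acc memo).1 = pvHL t index is acc ∧
          pvOk t (pvLoopA t index is acc memo).2 := by
      intro is
      induction is with
      | nil => intro acc memo hok; rw [pvLoopA, pvHL]; exact ⟨rfl, hok⟩
      | cons i rest ihr =>
        intro acc memo hok
        rw [pvLoopA, pvHL]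
        cases ha : PySem.List.pyGet? t i with
        | none =>
          cases hb : PySem.List.pyGet? t index <;> simp only <;> exact ihr acc memo hok
        | some a =>
          cases hb : PySem.List.pyGet? t index with
          | none => simp only; exact ihr acc memo hok
          | some b =>
            simp only
            by_cases hab : a < b
            · simp only [dif_pos hab]
              have hlt : pvMeasure t i < k :=
                lt_of_lt_of_le (pv_measure_lt ha hb hab) hk
              have hrec := IH (pvMeasure t i) hlt t i index memo le_rfl hok
              obtain ⟨hr1, hr2⟩ := hrec
              rw [hr1]
              exact ihr _ _ hr2
            · simp only [dif_neg hab]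
              exact ihr acc memo hok
    rw [pvHelperA]
    by_cases hc : memo.getD (index, prev) (-1) ≠ -1
    · rw [if_pos hc]
      exact ⟨hok index prev hc, hok⟩
    · rw [if_neg hc]
      by_cases hbase : index = (t.length : Int) - 1
      · rw [if_pos hbase]
        refine ⟨?_, hok⟩
        rw [pvH, if_pos hbase]
      · rw [if_neg hbase]
        simp only []
        obtain ⟨hl1, hl2⟩ := hloop
          (PySem.List.pyRange (max 0 (prev - 1)) (min (t.length : Int) (prev + 2)) 1)
          10000000000000000 memo hok
        refine ⟨?_, ?_⟩
        · show (pvLoopA t index _ _ _).1 + 1 = pvH t index prev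
          rw [pvH, if_neg hbase, hl1]
        · intro i p hne
          by_cases hkey : (i, p) = (index, prev)
          · injection hkey with hkey1 hkey2
            subst hkey1; subst hkey2
            rw [PySem.Dict.getD_insert_self]
            rw [pvH, if_neg hbase, hl1]
          · rw [PySem.Dict.getD_insert_of_ne _ _ _ hkey] at hne ⊢
            exact hl2 i p hne

-- ===== B side =====

def pvOrder (t : List Int) : List Int :=
  PySem.List.sorted (PySem.List.pyRange 0 (t.length : Int) 1)
    (fun i => PySem.List.pyGetD t i 0) false

-- table invariant: processed rows hold the memo-free values, row (n-1) is all zero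
def pvInv (t : List Int) (processed : List Int) (val : PySem.Dict (Int × Int) Int) : Prop :=
  (∀ i p : Int, 0 ≤ p → p < (t.length : Int) → i ∈ processed →
      val.getD (i, p) 0 = pvH t i p) ∧
  (∀ p : Int, val.getD ((t.length : Int) - 1, p) 0 = 0)

theorem pvInner_fold_eq (t : List Int) (index : Int) (val : PySem.Dict (Int × Int) Int)
    (hidx0 : 0 ≤ index) (hidx1 : index < (t.length : Int))
    (hread : ∀ i : Int, 0 ≤ i → i < (t.length : Int) →
      PySem.List.pyGetD t i 0 < PySem.List.pyGetD t index 0 →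
      val.getD (i, index) 0 = pvH t i index) :
    ∀ (is : List Int), (∀ i ∈ is, 0 ≤ i ∧ i < (t.length : Int)) → ∀ acc : Int,
      is.foldl (fun best i =>
          if PySem.List.pyGetD t i 0 < PySem.List.pyGetD t index 0 then
            min best (val.getD (i, index) 0)
          else best) acc
        = pvHL t index is acc := by
  intro is
  induction is with
  | nil => intro _ acc; rw [pvHL]; rfl
  | cons i rest ihr =>
    intro hv acc
    obtain ⟨hi0, hi1⟩ := hv i List.mem_cons_self
    have ha := pv_get_some t i hi0 hi1
    have hb := pv_get_some t index hidx0 hidx1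
    have hrest : ∀ i ∈ rest, 0 ≤ i ∧ i < (t.length : Int) :=
      fun j hj => hv j (List.mem_cons_of_mem i hj)
    rw [pvHL]
    cases haa : PySem.List.pyGet? t i with
    | none => rw [haa] at ha; cases ha
    | some a =>
      cases hbb : PySem.List.pyGet? t index with
      | none => rw [hbb] at hb; cases hb
      | some b =>
        rw [haa] at ha; rw [hbb] at hb
        injection ha with ha; injection hb with hb
        subst ha; subst hb
        simp only [List.foldl_cons]
        by_cases hcmp : PySem.List.pyGetD t i 0 < PySem.List.pyGetD t index 0
        · rw [dif_pos hcmp, if_pos hcmp, hread i hi0 hi1 hcmp]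
          exact ihr hrest _
        · rw [dif_neg hcmp, if_neg hcmp]
          exact ihr hrest _

theorem pvRow_ok (t : List Int) (processed : List Int) (index : Int)
    (hidx0 : 0 ≤ index) (hidx1 : index < (t.length : Int))
    (hne : index ≠ (t.length : Int) - 1)
    (hproc : ∀ i : Int, 0 ≤ i → i < (t.length : Int) →
      PySem.List.pyGetD t i 0 < PySem.List.pyGetD t index 0 → i ∈ processed) :
    ∀ (ps : List Int) (val : PySem.Dict (Int × Int) Int),
      (∀ p ∈ ps, 0 ≤ p ∧ p < (t.length : Int)) → pvInv t processed val →
      pvInv t processed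
          (ps.foldl (fun val prev => val.insert (index, prev) (pvInnerB t index prev val + 1)) val) ∧
      (∀ p ∈ ps,
        (ps.foldl (fun val prev => val.insert (index, prev) (pvInnerB t index prev val + 1)) val).getD
            (index, p) 0 = pvH t index p) ∧
      (∀ p : Int, p ∉ ps →
        (ps.foldl (fun val prev => val.insert (index, prev) (pvInnerB t index prev val + 1)) val).getD
            (index, p) 0 = val.getD (index, p) 0) := by
  intro ps
  induction ps with
  | nil =>
    intro val _ hinv
    exact ⟨hinv, fun p hp => absurd hp (List.not_mem_nil), fun p _ => rfl⟩
  | cons p0 ps' ihp =>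
    intro val hv hinv
    obtain ⟨hp00, hp01⟩ := hv p0 List.mem_cons_self
    have hwin : ∀ i ∈ PySem.List.pyRange (max 0 (p0 - 1)) (min (t.length : Int) (p0 + 2)) 1,
        0 ≤ i ∧ i < (t.length : Int) := by
      intro i hi
      have := PySem.List.mem_pyRange_one.mp hi
      omega
    have hIv : pvInnerB t index p0 val + 1 = pvH t index p0 := by
      rw [pvInnerB, pvInner_fold_eq t index val hidx0 hidx1
        (fun i h0 h1 hlt => hinv.1 i index hidx0 hidx1 (hproc i h0 h1 hlt)) _ hwin]
      rw [pvH, if_neg hne]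
    have hinv1 : pvInv t processed (val.insert (index, p0) (pvInnerB t index p0 val + 1)) := by
      constructor
      · intro i p h0 h1 hmem
        by_cases hkey : ((i, p) : Int × Int) = (index, p0)
        · injection hkey with hk1 hk2
          subst hk1; subst hk2
          rw [PySem.Dict.getD_insert_self, hIv]
        · rw [PySem.Dict.getD_insert_of_ne _ _ _ hkey]
          exact hinv.1 i p h0 h1 hmem
      · intro p
        have hkey : (((t.length : Int) - 1, p) : Int × Int) ≠ (index, p0) := by
          intro hcon
          injection hcon with hk1 _
          exact hne hk1.symm
        rw [PySem.Dict.getD_insert_of_ne _ _ _ hkey]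
        exact hinv.2 p
    obtain ⟨ih1, ih2, ih3⟩ := ihp (val.insert (index, p0) (pvInnerB t index p0 val + 1))
      (fun p hp => hv p (List.mem_cons_of_mem p0 hp)) hinv1
    rw [List.foldl_cons]
    refine ⟨ih1, ?_, ?_⟩
    · intro p hp
      rcases List.mem_cons.mp hp with h | h
      · subst h
        by_cases hmem : p ∈ ps'
        · exact ih2 p hmem
        · rw [ih3 p hmem, PySem.Dict.getD_insert_self, hIv]
      · exact ih2 p h
    · intro p hp
      have hp0 : p ≠ p0 := fun hcon => hp (hcon ▸ (List.mem_cons_self : p0 ∈ p0 :: ps'))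
      have hps' : p ∉ ps' := fun hcon => hp (List.mem_cons_of_mem p0 hcon)
      have hkey : ((index, p) : Int × Int) ≠ (index, p0) := by
        intro hcon; injection hcon with _ hk2; exact hp0 hk2
      rw [ih3 p hps', PySem.Dict.getD_insert_of_ne _ _ _ hkey]

theorem pvFold_ok (t : List Int) : ∀ (rest processed : List Int)
    (val : PySem.Dict (Int × Int) Int),
    processed ++ rest = pvOrder t → pvInv t processed val →
    pvInv t (processed ++ rest)
      (rest.foldl (fun val index =>
        if index = (t.length : Int) - 1 then val else pvRowB t index val) val) := by
  intro rest
  induction rest with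
  | nil => intro processed val _ hinv; simpa using hinv
  | cons index rest' ihr =>
    intro processed val horder hinv
    have hmemO : index ∈ pvOrder t := by
      rw [← horder]
      exact List.mem_append_right _ List.mem_cons_self
    have hmemR : index ∈ PySem.List.pyRange 0 (t.length : Int) 1 :=
      (PySem.List.mem_sorted _ _ _ _).mp hmemO
    obtain ⟨hidx0, hidx1⟩ := PySem.List.mem_pyRange_one.mp hmemR
    have hproc : ∀ i : Int, 0 ≤ i → i < (t.length : Int) →
        PySem.List.pyGetD t i 0 < PySem.List.pyGetD t index 0 → i ∈ processed := by
      intro i h0 h1 hlt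
      have hiO : i ∈ pvOrder t :=
        (PySem.List.mem_sorted _ _ _ _).mpr (PySem.List.mem_pyRange_one.mpr ⟨h0, h1⟩)
      rw [← horder] at hiO
      rcases List.mem_append.mp hiO with hiP | hiC
      · exact hiP
      · exfalso
        rcases List.mem_cons.mp hiC with h | h
        · subst h; exact lt_irrefl _ hlt
        · have hpair : (pvOrder t).Pairwise
              (fun a b => PySem.List.pyGetD t a 0 ≤ PySem.List.pyGetD t b 0) :=
            PySem.List.sorted_pairwise (PySem.List.pyRange 0 (t.length : Int) 1)
              (fun i => PySem.List.pyGetD t i 0)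
          rw [← horder] at hpair
          have h2 := (List.pairwise_append.mp hpair).2.1
          have h3 := (List.pairwise_cons.mp h2).1 i h
          omega
    have horder' : (processed ++ [index]) ++ rest' = pvOrder t := by
      rw [List.append_assoc, List.singleton_append]
      exact horder
    have hinv' : pvInv t (processed ++ [index])
        (if index = (t.length : Int) - 1 then val else pvRowB t index val) := by
      by_cases hb : index = (t.length : Int) - 1
      · rw [if_pos hb]
        constructor
        · intro i p h0 h1 hmem
          rcases List.mem_append.mp hmem with hiP | hiS
          · exact hinv.1 i p h0 h1 hiP
          · have : i = index := List.mem_singleton.mp hiS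
            subst this; subst hb
            rw [hinv.2 p, pvH, if_pos rfl]
        · exact hinv.2
      · rw [if_neg hb]
        have hwin : ∀ p ∈ PySem.List.pyRange 0 (t.length : Int) 1,
            0 ≤ p ∧ p < (t.length : Int) := by
          intro p hp
          have := PySem.List.mem_pyRange_one.mp hp
          omega
        obtain ⟨r1, r2, r3⟩ := pvRow_ok t processed index hidx0 hidx1 hb hproc
          (PySem.List.pyRange 0 (t.length : Int) 1) val hwin hinv
        constructor
        · intro i p h0 h1 hmem
          rcases List.mem_append.mp hmem with hiP | hiS
          · exact r1.1 i p h0 h1 hiP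
          · have : i = index := List.mem_singleton.mp hiS
            subst this
            exact r2 p (PySem.List.mem_pyRange_one.mpr ⟨h0, h1⟩)
        · exact r1.2
    have := ihr (processed ++ [index])
      (if index = (t.length : Int) - 1 then val else pvRowB t index val) horder' hinv'
    rw [List.append_assoc, List.singleton_append] at this
    simpa [List.foldl_cons] using this

theorem min_movimientos_spec : Claim_equal_min_movimientos := by
  unfold Claim_equal_min_movimientos
  intro torres hdom hpre
  unfold Spec_min_movimientos min_movimientos min_movimientos_alt
  by_cases h1 : torres.length = 1
  · rw [if_pos h1, if_pos h1]
  · rw [if_neg h1, if_neg h1]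
    have hok : pvOk torres PySem.Dict.empty := by
      intro i p hne
      rw [PySem.Dict.getD_empty] at hne
      exact absurd rfl hne
    have hA := (pvHelperA_ok (pvMeasure torres 0) torres 0 0 PySem.Dict.empty le_rfl hok).1
    rw [hA]
    have hn1 : 1 ≤ (torres.length : Int) := by
      cases torres with
      | nil => exact absurd rfl hpre
      | cons x xs => simp
    have hinv0 : pvInv torres [] PySem.Dict.empty := by
      constructor
      · intro i p _ _ hmem; exact absurd hmem (List.not_mem_nil)
      · intro p; exact PySem.Dict.getD_empty _ _
    have hfold := pvFold_ok torres (pvOrder torres) [] PySem.Dict.empty (by simp) hinv0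
    have h0mem : (0 : Int) ∈ pvOrder torres :=
      (PySem.List.mem_sorted _ _ _ _).mpr (PySem.List.mem_pyRange_one.mpr ⟨le_rfl, by omega⟩)
    have hB := hfold.1 0 0 le_rfl (by omega) (by simpa using h0mem)
    exact hB.symm
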